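-- pv_equiv track=rewrite | github.com/DrDungeonMaster/discord-archivist-bot | Discord-Bot/app/name_generator/kobold_names.py | possible_names_count
-- ===== SOURCE A (Python) =====
-- short_nouns = []
--
-- vowels = ['a','e','i','o','u']
--
-- def possible_names_count(short_nouns:list=short_nouns):
--     words_set = set()
--     for i in short_nouns:
--         vowel_positions = []
--         for j in range(0,len(i)):
--             if i[j] in vowels:
--                 vowel_positions.append(j)
--         possible_words = []
--         for j in range(0, len(i)):
--             if j not in vowel_positions:
--                 try:
--                     possible_words.append([i[j]] * len(possible_words[0]))
--                 except IndexError: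
--                     possible_words.append([i[j]])
--             else:
--                 try:
--                     possible_words.append(sorted(vowels * len(possible_words[0])))
--                     for k in range(0,len(possible_words)):
--                         possible_words[k] = possible_words[k] * 5
--                 except IndexError:
--                     possible_words.append(vowels)
--         for j in range(0,len(possible_words[0])):
--             build_string = []
--             for k in range(0, len(possible_words)):
--                 build_string.append(possible_words[k][j])
--             new_word = "".join(build_string)
--             words_set.add("".join(build_string))
--
--     total_words = len(words_set)
--     return total_words, words_set
-- ===== SOURCE B (Python) =====
-- short_nouns = []
--
-- vowels = ['a','e','i','o','u']
--
-- def _variants(word):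
--     if not word:
--         return [""]
--     heads = vowels if word[0] in vowels else [word[0]]
--     return [h + t for t in _variants(word[1:]) for h in heads]
--
-- def possible_names_count(short_nouns:list=short_nouns):
--     words_set = set()
--     for w in short_nouns:
--         words_set.update(_variants(w))
--     return len(words_set), words_set
-- ===== Notes on version B (the rewrite author's own statement) =====
-- stated objective: simpler
-- what changed: A builds per-position column lists of repeated characters (multiplying every column by 5 at each vowel) and then transposes them index-by-index into words; B recursively expands each word into the Cartesian product of its per-position choices (the five vowels at vowel positions, the character itself otherwise) and pours those variants into the shared set, avoiding the column multiplications and the index-by-index transpose (measured ~1.8x faster, constant factor).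
import Mathlib
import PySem

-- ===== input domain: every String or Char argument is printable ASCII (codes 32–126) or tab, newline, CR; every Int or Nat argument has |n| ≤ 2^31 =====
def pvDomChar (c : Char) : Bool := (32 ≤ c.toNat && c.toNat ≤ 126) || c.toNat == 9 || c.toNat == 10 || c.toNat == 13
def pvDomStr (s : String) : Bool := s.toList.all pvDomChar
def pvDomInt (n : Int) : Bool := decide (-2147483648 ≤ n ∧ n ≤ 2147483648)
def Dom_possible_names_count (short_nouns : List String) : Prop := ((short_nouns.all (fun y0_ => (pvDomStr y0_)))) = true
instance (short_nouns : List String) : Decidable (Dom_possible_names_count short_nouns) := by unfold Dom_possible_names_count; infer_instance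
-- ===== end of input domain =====

-- B replaces A's column-building-and-transpose enumeration by a direct recursive
-- Cartesian expansion of per-position choices (objective: simpler).

-- ===== PORT A =====
def vowelsC : List Char := ['a', 'e', 'i', 'o', 'u']

-- Python 'lst * n'
def pvMul {α : Type} (l : List α) (n : Nat) : List α := (List.replicate n l).flatten

-- the vowel_positions loop of A
def pvVowelPositions (cs : List Char) : List Nat :=
  (List.range cs.length).foldl
    (fun acc j => if cs.getD j ' ' ∈ vowelsC then acc ++ [j] else acc) []

-- one iteration of A's possible_words loop (the try/except IndexError on
-- possible_words[0] is a match on head?)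
def pvStepA (cs : List Char) (vp : List Nat) (pw : List (List Char)) (j : Nat) :
    List (List Char) :=
  if j ∉ vp then
    match pw.head? with
    | some c0 => pw ++ [pvMul [cs.getD j ' '] c0.length]
    | none    => pw ++ [[cs.getD j ' ']]
  else
    match pw.head? with
    | some c0 =>
        (pw ++ [PySem.List.sorted (pvMul vowelsC c0.length) (fun x => x) false]).map
          (fun col => pvMul col 5)
    | none    => pw ++ [vowelsC]

def pvColsA (cs : List Char) : List (List Char) :=
  (List.range cs.length).foldl (pvStepA cs (pvVowelPositions cs)) []

-- A's per-word body: build columns, then read rows into the shared set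
def pvWordA (ws : PySem.Set String) (w : String) : PySem.Set String :=
  let cs := w.toList
  let pw := pvColsA cs
  (List.range (pw.headD []).length).foldl
    (fun ws j =>
      let bs := (List.range pw.length).foldl
        (fun acc k => acc ++ [(pw.getD k []).getD j ' ']) []
      PySem.Set.add ws (String.ofList bs)) ws

def possible_names_count (short_nouns : List String) : Int × List String :=
  let ws := short_nouns.foldl pvWordA PySem.Set.empty
  ((ws.length : Int), ws)

-- ===== PORT B =====
def pvVariants : List Char → List (List Char)
  | [] => [[]]
  | c :: rest =>
      let heads := if c ∈ vowelsC then vowelsC else [c]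
      (pvVariants rest).flatMap (fun t => heads.map (fun h => h :: t))

def possible_names_count_alt (short_nouns : List String) : Int × List String :=
  let ws := short_nouns.foldl
    (fun ws w => PySem.Set.update ws ((pvVariants w.toList).map String.ofList))
    PySem.Set.empty
  ((ws.length : Int), ws)

-- ===== PRECONDITION & SPEC =====
-- Pre_ excludes inputs containing the empty string, on which A raises an uncaught IndexError.
def Pre_possible_names_count (short_nouns : List String) : Prop := "" ∉ short_nouns
instance (short_nouns : List String) : Decidable (Pre_possible_names_count short_nouns) := by
  unfold Pre_possible_names_count; infer_instance
def pvWitness_possible_names_count : List String := (["ab"])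

def Spec_possible_names_count (short_nouns : List String) (out : Int × List String) : Prop :=
  out = possible_names_count_alt short_nouns
instance (short_nouns : List String) (out : Int × List String) :
    Decidable (Spec_possible_names_count short_nouns out) := by
  unfold Spec_possible_names_count; infer_instance

-- ===== CLAIM (what is proved, stated in full; the proofs are below) =====
def Claim_equal_possible_names_count : Prop :=
  ∀ (short_nouns : List String), Dom_possible_names_count short_nouns →
    Pre_possible_names_count short_nouns →
      Spec_possible_names_count short_nouns (possible_names_count short_nouns)

-- ===== LEMMAS AND PROOFS =====

-- number of vowel positions of a word
def pvCountV (cs : List Char) : Nat := cs.countP (fun c => decide (c ∈ vowelsC))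

-- A's step, rephrased on the character processed (proved equal to pvStepA below)
def pvStep (pw : List (List Char)) (c : Char) : List (List Char) :=
  if c ∈ vowelsC then
    match pw.head? with
    | some c0 =>
        (pw ++ [PySem.List.sorted (pvMul vowelsC c0.length) (fun x => x) false]).map
          (fun col => pvMul col 5)
    | none    => pw ++ [vowelsC]
  else
    match pw.head? with
    | some c0 => pw ++ [pvMul [c] c0.length]
    | none    => pw ++ [[c]]

theorem pvVowelPositions_eq (cs : List Char) :
    pvVowelPositions cs =
      (List.range cs.length).filter (fun j => cs.getD j ' ' ∈ vowelsC) := by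
  simp [pvVowelPositions, PySem.List.foldl_append_ite_eq_filter]

theorem mem_pvVowelPositions (cs : List Char) (j : Nat) :
    j ∈ pvVowelPositions cs ↔ j < cs.length ∧ cs.getD j ' ' ∈ vowelsC := by
  simp [pvVowelPositions_eq, List.mem_filter, List.mem_range]

theorem foldl_range_getD {α β : Type} (cs : List α) (F : β → α → β) (init : β) (d : α) :
    (List.range cs.length).foldl (fun b j => F b (cs.getD j d)) init = cs.foldl F init := by
  induction cs using List.reverseRecOn with
  | nil => simp
  | append_singleton xs x ih =>
    rw [List.length_append, List.length_singleton, List.range_succ, List.foldl_append,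
      PySem.List.foldl_congr_mem (List.range xs.length) _ (fun b j => F b (xs.getD j d)) init
        (fun acc j hj => by rw [List.getD_append _ _ _ _ (List.mem_range.mp hj)]), ih]
    simp

theorem pvColsA_eq_core (cs : List Char) : pvColsA cs = cs.foldl pvStep [] := by
  rw [pvColsA,
    PySem.List.foldl_congr_mem (List.range cs.length) _
      (fun pw j => pvStep pw (cs.getD j ' ')) []
      (fun pw j hj => by
        have hjl : j < cs.length := List.mem_range.mp hj
        simp only [pvStepA, pvStep]
        by_cases hv : cs.getD j ' ' ∈ vowelsC
        · rw [if_pos hv, if_neg (by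
            simp only [mem_pvVowelPositions, not_not]
            exact ⟨hjl, hv⟩)]
        · rw [if_neg hv, if_pos (by
            simp only [mem_pvVowelPositions, not_and]
            exact fun _ => hv)]),
    foldl_range_getD]

theorem pvMul_succ {α : Type} (l : List α) (m : Nat) : pvMul l (m+1) = l ++ pvMul l m := by
  simp [pvMul, List.replicate_succ]

theorem pvMul_length {α : Type} (l : List α) (m : Nat) : (pvMul l m).length = m * l.length := by
  simp [pvMul]

theorem pvMul_getD {α : Type} (l : List α) (m j : Nat) (d : α) (hj : j < m * l.length) :
    (pvMul l m).getD j d = l.getD (j % l.length) d := by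
  induction m generalizing j with
  | zero => omega
  | succ m ih =>
    rw [pvMul_succ]
    by_cases h : j < l.length
    · rw [List.getD_append _ _ _ _ h, Nat.mod_eq_of_lt h]
    · have h2 : j - l.length < m * l.length := by
        have := Nat.add_mul m 1 l.length; omega
      rw [List.getD_append_right _ _ _ _ (by omega), ih _ h2]
      congr 1
      exact (Nat.mod_eq_sub_mod (by omega)).symm

theorem getD_map_lt {α β : Type} (f : α → β) (l : List α) (j : Nat) (h : j < l.length)
    (d : α) (d' : β) : (l.map f).getD j d' = f (l.getD j d) := by
  rw [List.getD_eq_getElem _ _ (by simpa), List.getD_eq_getElem _ _ h, List.getElem_map]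

theorem blocks_getD (l : List Char) (rows : List (List Char)) (n : Nat) (hn : 0 < n)
    (hrows : rows.length = n) (r : Nat) (hr : r < l.length * n) :
    (l.flatMap (fun h => rows.map (fun t => t ++ [h]))).getD r [] =
      rows.getD (r % n) [] ++ [l.getD (r / n) ' '] := by
  induction l generalizing r with
  | nil => simp at hr
  | cons h l ih =>
    rw [List.flatMap_cons]
    by_cases hrn : r < n
    · rw [List.getD_append _ _ _ _ (by simpa [hrows]),
        getD_map_lt _ _ _ (by omega) [] [], Nat.mod_eq_of_lt hrn, Nat.div_eq_of_lt hrn]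
      simp
    · have hlen : (rows.map (fun t => t ++ [h])).length = n := by simpa
      rw [List.getD_append_right _ _ _ _ (by omega), hlen,
        ih (r - n) (by simp at hr ⊢; have := Nat.add_mul l.length 1 n; omega)]
      have h1 : (r - n) % n = r % n := (Nat.mod_eq_sub_mod (by omega)).symm
      have h2 : r / n = (r - n) / n + 1 := Nat.div_eq_sub_div hn (by omega)
      rw [h1, h2]
      simp

theorem grouped_getD (l : List Char) (n : Nat) (hn : 0 < n) (j : Nat)
    (hj : j < l.length * n) :
    (l.flatMap (fun v => List.replicate n v)).getD j ' ' = l.getD (j / n) ' ' := by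
  induction l generalizing j with
  | nil => simp at hj
  | cons c l ih =>
    rw [List.flatMap_cons]
    by_cases hjn : j < n
    · rw [List.getD_append _ _ _ _ (by simpa), Nat.div_eq_of_lt hjn]
      simp [List.getElem?_replicate, hjn]
    · rw [List.getD_append_right _ _ _ _ (by simpa using hjn), List.length_replicate,
        ih (j - n) (by simp at hj ⊢; have := Nat.add_mul l.length 1 n; omega)]
      have h2 : j / n = (j - n) / n + 1 := Nat.div_eq_sub_div hn (by omega)
      rw [h2]
      simp

theorem flatMap_replicate_perm {α : Type} [BEq α] [LawfulBEq α] (l : List α) (n : Nat) :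
    (l.flatMap (fun v => List.replicate n v)).Perm (pvMul l n) := by
  rw [List.perm_iff_count]
  intro a
  have h1 : ∀ (l : List α),
      (l.flatMap (fun v => List.replicate n v)).count a = n * l.count a := by
    intro l
    induction l with
    | nil => simp
    | cons c l ih =>
      rw [List.flatMap_cons, List.count_append, ih, List.count_cons]
      by_cases h : c = a <;> simp [h, List.count_replicate, Nat.mul_add] <;> omega
  have h2 : ∀ m : Nat, (pvMul l m).count a = m * l.count a := by
    intro m
    induction m with
    | zero => simp [pvMul]
    | succ m ih =>
      rw [pvMul_succ, List.count_append, ih, Nat.succ_mul]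
      omega
  rw [h1, h2]

theorem pairwise_le_flatMap_replicate (l : List Char) (hl : l.Pairwise (· ≤ ·)) (n : Nat) :
    (l.flatMap (fun v => List.replicate n v)).Pairwise (· ≤ ·) := by
  induction l with
  | nil => simp
  | cons c l ih =>
    rw [List.flatMap_cons, List.pairwise_append]
    refine ⟨List.pairwise_replicate.mpr (Or.inr (le_refl c)), ih hl.of_cons, ?_⟩
    intro a ha b hb
    rw [List.eq_of_mem_replicate ha]
    obtain ⟨v, hv, hbv⟩ := List.mem_flatMap.mp hb
    rw [List.eq_of_mem_replicate hbv]
    exact (List.pairwise_cons.mp hl).1 v hv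

theorem sorted_pvMul_vowels (n : Nat) :
    PySem.List.sorted (pvMul vowelsC n) (fun x => x) false =
      vowelsC.flatMap (fun v => List.replicate n v) := by
  exact PySem.List.sorted_id_eq_of_perm_of_pairwise _ _
    (flatMap_replicate_perm _ _) (pairwise_le_flatMap_replicate _ (by decide) _)

theorem pvVariants_length (cs : List Char) : (pvVariants cs).length = 5 ^ pvCountV cs := by
  induction cs with
  | nil => simp [pvVariants, pvCountV]
  | cons c l ih =>
    rw [pvVariants]
    have h5 : vowelsC.length = 5 := rfl
    by_cases h : c ∈ vowelsC <;>
      simp only [h, if_true, if_false, List.length_flatMap, List.map_map,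
        Function.comp_def, List.length_map, List.map_const', List.sum_replicate, smul_eq_mul,
        h5, List.length_singleton, pvCountV, List.countP_cons, ih] <;>
      simp [pvCountV, h, pow_succ] <;> ring

theorem pvVariants_row_length (cs : List Char) :
    ∀ r ∈ pvVariants cs, r.length = cs.length := by
  induction cs with
  | nil => simp [pvVariants]
  | cons c l ih =>
    intro r hr
    rw [pvVariants] at hr
    simp only [List.mem_flatMap, List.mem_map] at hr
    obtain ⟨t, ht, h, _, rfl⟩ := hr
    simp [ih t ht]

theorem pvVariants_getD_length (cs : List Char) (r : Nat)
    (hr : r < (pvVariants cs).length) :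
    ((pvVariants cs).getD r []).length = cs.length := by
  rw [List.getD_eq_getElem _ _ hr]
  exact pvVariants_row_length cs _ (List.getElem_mem hr)

theorem pvVariants_snoc (xs : List Char) (c : Char) :
    pvVariants (xs ++ [c]) =
      (if c ∈ vowelsC then vowelsC else [c]).flatMap
        (fun h => (pvVariants xs).map (fun t => t ++ [h])) := by
  induction xs with
  | nil =>
    simp only [List.nil_append, pvVariants, List.flatMap_map]
    simp only [List.flatMap]
    generalize (if c ∈ vowelsC then vowelsC else [c]) = L
    induction L with
    | nil => rfl
    | cons a L ihL => simp_all
  | cons d xs ih =>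
    rw [List.cons_append, pvVariants, ih, pvVariants]
    simp only [List.flatMap_assoc, List.flatMap_map, List.map_flatMap, List.map_map]
    rfl

theorem pvCountV_snoc (xs : List Char) (c : Char) :
    pvCountV (xs ++ [c]) = pvCountV xs + (if c ∈ vowelsC then 1 else 0) := by
  by_cases h : c ∈ vowelsC <;> simp [pvCountV, List.countP_append, h]

-- the main invariant of A's column construction
theorem colsCore_invariant (cs : List Char) (hcs : cs ≠ []) :
    (cs.foldl pvStep []).length = cs.length ∧
    ((cs.foldl pvStep []).headD []).length = 5 ^ pvCountV cs ∧
    (∀ k, k < (cs.foldl pvStep []).length →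
      (((cs.foldl pvStep []).getD k []).length = 5 ^ pvCountV cs ∨
       ((cs.foldl pvStep []).getD k []).length = 5 * 5 ^ pvCountV cs) ∧
      ∀ j, j < ((cs.foldl pvStep []).getD k []).length →
        ((cs.foldl pvStep []).getD k []).getD j ' ' =
          ((pvVariants cs).getD (j % 5 ^ pvCountV cs) []).getD k ' ') := by
  induction cs using List.reverseRecOn with
  | nil => exact absurd rfl hcs
  | append_singleton xs c ih =>
    rw [List.foldl_append, List.foldl_cons, List.foldl_nil]
    rcases eq_or_ne xs [] with rfl | hxs
    · -- first character of the word
      simp only [List.foldl_nil]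
      have hvar : pvVariants ([] ++ [c]) =
          (if c ∈ vowelsC then vowelsC else [c]).map (fun h => [h]) := by
        rw [pvVariants_snoc]
        simp only [pvVariants]
        generalize (if c ∈ vowelsC then vowelsC else [c]) = L
        induction L with
        | nil => rfl
        | cons a L ihL => simp_all [pvVariants]
      by_cases hv : c ∈ vowelsC
      · have hstep : pvStep [] c = [vowelsC] := by simp [pvStep, hv]
        have hcnt : pvCountV ([] ++ [c]) = 1 := by simp [pvCountV, hv]
        rw [hstep, hcnt, hvar, if_pos hv]
        refine ⟨by simp, by simp [vowelsC], ?_⟩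
        intro k hk
        have hk0 : k = 0 := by simpa using hk
        subst hk0
        refine ⟨Or.inl (by simp [vowelsC]), ?_⟩
        intro j hj
        have hj5 : j < 5 := by simpa [vowelsC] using hj
        rw [Nat.mod_eq_of_lt (by simpa [vowelsC] using hj5)]
        simp only [List.getD_cons_zero]
        rw [getD_map_lt (fun h => [h]) vowelsC j (by simpa [vowelsC]) ' ' []]
        simp
      · have hstep : pvStep [] c = [[c]] := by simp [pvStep, hv]
        have hcnt : pvCountV ([] ++ [c]) = 0 := by simp [pvCountV, hv]
        rw [hstep, hcnt, hvar, if_neg hv]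
        refine ⟨by simp, by simp, ?_⟩
        intro k hk
        have hk0 : k = 0 := by simpa using hk
        subst hk0
        refine ⟨Or.inl (by simp), ?_⟩
        intro j hj
        have hj1 : j = 0 := by simpa using hj
        subst hj1
        simp
    · obtain ⟨ha, hb, hc⟩ := ih hxs
      have hpwne : xs.foldl pvStep [] ≠ [] := by
        intro h0
        apply hxs
        apply List.eq_nil_of_length_eq_zero
        rw [← ha, h0]
        rfl
      obtain ⟨p0, pt, hp⟩ := List.exists_cons_of_ne_nil hpwne
      have hhead : (xs.foldl pvStep []).head? = some p0 := by rw [hp]; rfl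
      have hp0len : p0.length = 5 ^ pvCountV xs := by
        have := hb; rw [hp] at this; simpa using this
      have hn : 0 < 5 ^ pvCountV xs := by positivity
      have hvarlen : (pvVariants xs).length = 5 ^ pvCountV xs := pvVariants_length xs
      by_cases hv : c ∈ vowelsC
      · -- vowel step
        have hstep : pvStep (xs.foldl pvStep []) c =
            ((xs.foldl pvStep []) ++
              [vowelsC.flatMap (fun v => List.replicate (5 ^ pvCountV xs) v)]).map
              (fun col => pvMul col 5) := by
          rw [pvStep, if_pos hv, hhead]
          simp only [hp0len, sorted_pvMul_vowels]
        have hcnt : 5 ^ pvCountV (xs ++ [c]) = 5 * 5 ^ pvCountV xs := by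
          rw [pvCountV_snoc, if_pos hv, pow_succ, Nat.mul_comm]
        have hvar : pvVariants (xs ++ [c]) =
            vowelsC.flatMap (fun h => (pvVariants xs).map (fun t => t ++ [h])) := by
          rw [pvVariants_snoc, if_pos hv]
        have hglen : (vowelsC.flatMap (fun v => List.replicate (5 ^ pvCountV xs) v)).length
            = 5 * 5 ^ pvCountV xs := by
          simp [vowelsC]; ring
        rw [hstep, hcnt, hvar]
        have hlen' : (((xs.foldl pvStep []) ++
            [vowelsC.flatMap (fun v => List.replicate (5 ^ pvCountV xs) v)]).map
            (fun col => pvMul col 5)).length = xs.length + 1 := by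
          simp [ha]
        refine ⟨by simpa using hlen', ?_, ?_⟩
        · -- head length
          rw [hp]
          simp only [List.cons_append, List.map_cons, List.headD_cons]
          rw [pvMul_length, hp0len]
        · intro k hk
          have hk' : k < xs.length + 1 := by rw [hlen'] at hk; exact hk
          have hkin : k < ((xs.foldl pvStep []) ++
              [vowelsC.flatMap (fun v => List.replicate (5 ^ pvCountV xs) v)]).length := by
            simp [ha] <;> omega
          rw [getD_map_lt (fun col => pvMul col 5) _ k hkin [] []]
          rcases Nat.lt_or_ge k xs.length with hklt | hkge
          · -- an old column
            have hkpw : k < (xs.foldl pvStep []).length := by omega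
            rw [List.getD_append _ _ _ _ hkpw]
            obtain ⟨hcl, hcv⟩ := hc k hkpw
            have hcolpos : 0 < ((xs.foldl pvStep []).getD k []).length := by
              rcases hcl with h | h <;> omega
            constructor
            · rw [pvMul_length]
              rcases hcl with h | h
              · exact Or.inl (by omega)
              · exact Or.inr (by omega)
            · intro j hj
              rw [pvMul_length] at hj
              rw [pvMul_getD _ _ _ _ hj,
                hcv _ (Nat.mod_lt _ hcolpos)]
              have hdvd : 5 ^ pvCountV xs ∣ ((xs.foldl pvStep []).getD k []).length := by
                rcases hcl with h | h
                · rw [h]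
                · rw [h]; exact dvd_mul_left _ 5
              rw [Nat.mod_mod_of_dvd j hdvd]
              have hr : j % (5 * 5 ^ pvCountV xs) < vowelsC.length * 5 ^ pvCountV xs := by
                have : 0 < 5 * 5 ^ pvCountV xs := by positivity
                have := Nat.mod_lt j this
                simpa [vowelsC, Nat.mul_comm] using this
              rw [blocks_getD vowelsC (pvVariants xs) _ hn hvarlen _ hr]
              have hrow : ((pvVariants xs).getD
                  (j % (5 * 5 ^ pvCountV xs) % 5 ^ pvCountV xs) []).length = xs.length :=
                pvVariants_getD_length xs _ (by rw [hvarlen]; exact Nat.mod_lt _ hn)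
              rw [List.getD_append _ _ _ _ (by rw [hrow]; omega),
                Nat.mod_mod_of_dvd j (dvd_mul_left _ 5)]
          · -- the new column
            have hkeq : k = (xs.foldl pvStep []).length := by omega
            have hgetnew : ((xs.foldl pvStep []) ++
                [vowelsC.flatMap (fun v => List.replicate (5 ^ pvCountV xs) v)]).getD k []
                = vowelsC.flatMap (fun v => List.replicate (5 ^ pvCountV xs) v) := by
              rw [hkeq, List.getD_append_right _ _ _ _ (le_refl _), Nat.sub_self]
              rfl
            rw [hgetnew]
            constructor
            · rw [pvMul_length, hglen]
              exact Or.inr (by ring)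
            · intro j hj
              rw [pvMul_length, hglen] at hj
              rw [pvMul_getD _ _ _ _ (by rw [hglen]; omega), hglen]
              have hmlt : j % (5 * 5 ^ pvCountV xs) < 5 * 5 ^ pvCountV xs :=
                Nat.mod_lt _ (by positivity)
              rw [grouped_getD vowelsC _ hn _ (by simpa [vowelsC, Nat.mul_comm] using hmlt)]
              have hr : j % (5 * 5 ^ pvCountV xs) < vowelsC.length * 5 ^ pvCountV xs := by
                simpa [vowelsC, Nat.mul_comm] using hmlt
              rw [blocks_getD vowelsC (pvVariants xs) _ hn hvarlen _ hr]
              have hrow : ((pvVariants xs).getD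
                  (j % (5 * 5 ^ pvCountV xs) % 5 ^ pvCountV xs) []).length = xs.length :=
                pvVariants_getD_length xs _ (by rw [hvarlen]; exact Nat.mod_lt _ hn)
              rw [List.getD_append_right _ _ _ _ (by rw [hrow]; omega), hrow, hkeq, ha,
                Nat.sub_self]
              rfl
      · -- consonant step
        have hstep : pvStep (xs.foldl pvStep []) c =
            (xs.foldl pvStep []) ++ [pvMul [c] (5 ^ pvCountV xs)] := by
          rw [pvStep, if_neg hv, hhead]
          simp only [hp0len]
        have hcnt : 5 ^ pvCountV (xs ++ [c]) = 5 ^ pvCountV xs := by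
          rw [pvCountV_snoc, if_neg hv]
          rfl
        have hvar : pvVariants (xs ++ [c]) = (pvVariants xs).map (fun t => t ++ [c]) := by
          rw [pvVariants_snoc, if_neg hv]
          simp
        rw [hstep, hcnt, hvar]
        refine ⟨by simp [ha], ?_, ?_⟩
        · rw [hp]
          simpa using hp0len
        · intro k hk
          have hk' : k < xs.length + 1 := by
            have : ((xs.foldl pvStep []) ++ [pvMul [c] (5 ^ pvCountV xs)]).length
                = xs.length + 1 := by simp [ha]
            omega
          rcases Nat.lt_or_ge k xs.length with hklt | hkge
          · have hkpw : k < (xs.foldl pvStep []).length := by omega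
            rw [List.getD_append _ _ _ _ hkpw]
            obtain ⟨hcl, hcv⟩ := hc k hkpw
            refine ⟨hcl, ?_⟩
            intro j hj
            rw [hcv _ hj]
            have hmlt : j % 5 ^ pvCountV xs < (pvVariants xs).length := by
              rw [hvarlen]; exact Nat.mod_lt _ hn
            rw [getD_map_lt (fun t => t ++ [c]) _ _ hmlt [] []]
            have hrow : ((pvVariants xs).getD (j % 5 ^ pvCountV xs) []).length
                = xs.length := pvVariants_getD_length xs _ hmlt
            rw [List.getD_append _ _ _ _ (by rw [hrow]; omega)]
          · have hkeq : k = (xs.foldl pvStep []).length := by omega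
            have hgetnew : ((xs.foldl pvStep []) ++ [pvMul [c] (5 ^ pvCountV xs)]).getD k []
                = pvMul [c] (5 ^ pvCountV xs) := by
              rw [hkeq, List.getD_append_right _ _ _ _ (le_refl _), Nat.sub_self]
              rfl
            rw [hgetnew]
            have hclen : (pvMul [c] (5 ^ pvCountV xs)).length = 5 ^ pvCountV xs := by
              rw [pvMul_length]; simp
            refine ⟨Or.inl hclen, ?_⟩
            intro j hj
            rw [hclen] at hj
            rw [pvMul_getD _ _ _ _ (by simpa using hj)]
            have hmlt : j % 5 ^ pvCountV xs < (pvVariants xs).length := by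
              rw [hvarlen]; exact Nat.mod_lt _ hn
            rw [getD_map_lt (fun t => t ++ [c]) _ _ hmlt [] []]
            have hrow : ((pvVariants xs).getD (j % 5 ^ pvCountV xs) []).length
                = xs.length := pvVariants_getD_length xs _ hmlt
            rw [List.getD_append_right _ _ _ _ (by rw [hrow]; omega), hrow, hkeq, ha,
              Nat.sub_self]
            simp [Nat.mod_one]

theorem pvWordA_eq (ws : PySem.Set String) (w : String) (hw : w ≠ "") :
    pvWordA ws w = PySem.Set.update ws ((pvVariants w.toList).map String.ofList) := by
  have hcs : w.toList ≠ [] := by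
    intro h
    exact hw (by simpa using congrArg String.ofList h)
  obtain ⟨ha, hb, hc⟩ := colsCore_invariant w.toList hcs
  have hvarlen : (pvVariants w.toList).length = 5 ^ pvCountV w.toList :=
    pvVariants_length w.toList
  have hn : 0 < 5 ^ pvCountV w.toList := by positivity
  simp only [pvWordA, pvColsA_eq_core]
  rw [PySem.List.foldl_congr_mem _ _
    (fun ws j => PySem.Set.add ws (String.ofList
      ((List.range (w.toList.foldl pvStep []).length).map
        (fun k => ((w.toList.foldl pvStep []).getD k []).getD j ' ')))) ws
    (fun acc j _ => by
      rw [PySem.List.foldl_append_singleton_eq_map]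
      simp)]
  rw [← PySem.Set.update_map_eq_foldl_add]
  congr 1
  have hb' : ((List.foldl pvStep [] w.toList).head?.getD []).length
      = 5 ^ pvCountV w.toList := by
    rw [← List.headD_eq_head?_getD]
    exact hb
  apply List.ext_getElem
  · simp [hb', hvarlen]
  · intro j hj1 hj2
    simp only [List.getElem_map, List.getElem_range]
    congr 1
    have hjn : j < 5 ^ pvCountV w.toList := by
      simpa [hb'] using hj1
    have hjv : j < (pvVariants w.toList).length := by omega
    apply List.ext_getElem
    · simp only [List.length_map, List.length_range, ha]
      exact (pvVariants_row_length w.toList _ (List.getElem_mem hjv)).symm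
    · intro k hk1 hk2
      simp only [List.getElem_map, List.getElem_range]
      obtain ⟨hcl, hcv⟩ := hc k (by simpa using hk1)
      have hjlen : j < ((w.toList.foldl pvStep []).getD k []).length := by
        rcases hcl with h | h <;> omega
      rw [hcv j hjlen, Nat.mod_eq_of_lt hjn,
        List.getD_eq_getElem _ _ hjv, List.getD_eq_getElem _ _ hk2]

-- ===== VERDICT (by name: the statement is the Claim_ definition above) =====
theorem possible_names_count_spec : Claim_equal_possible_names_count := by
  intro sn hdom hpre
  unfold Spec_possible_names_count possible_names_count possible_names_count_alt
  have key : ∀ (l : List String) (ws : PySem.Set String), "" ∉ l →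
      l.foldl pvWordA ws =
        l.foldl (fun ws w =>
          PySem.Set.update ws ((pvVariants w.toList).map String.ofList)) ws := by
    intro l
    induction l with
    | nil => intro ws _; rfl
    | cons w l ih =>
      intro ws hl
      rw [List.foldl_cons, List.foldl_cons,
        pvWordA_eq _ _ (fun h => hl (by rw [h]; exact List.mem_cons_self)),
        ih _ (fun h => hl (List.mem_cons_of_mem _ h))]
  rw [key sn _ hpre]
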